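-- pv_equiv track=rewrite | github.com/opentelekomcloud/ansible-collection-gitcontrol | plugins/modules/repositories.py | _get_privs
-- ===== SOURCE A (Python) =====
-- def _get_privs(mapping):
--     """Convert teams/collaborators mapping into entity/priv mapping"""
--     privs = dict()
--     for k, v in mapping.items():
--         for priv in ['maintain', 'pull', 'push', 'admin', 'triage']:
--             if isinstance(v, list):
--                 for team in v:
--                     if team not in privs:
--                         privs[team] = dict(
--                             admin=False, pull=False,
--                             push=False, maintain=False, triage=False)
--                     if (
--                         priv in mapping
--                         and isinstance(mapping[priv], list)
--                         and team in mapping[priv]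
--                     ):
--                         privs[team][priv] = True
--     return privs
-- ===== SOURCE B (Python) =====
-- def _get_privs(mapping):
--     """Convert teams/collaborators mapping into entity/priv mapping"""
--     privs = {}
--     for v in mapping.values():
--         for team in v:
--             privs.setdefault(team, dict(
--                 admin=False, pull=False,
--                 push=False, maintain=False, triage=False))
--     for priv in ['maintain', 'pull', 'push', 'admin', 'triage']:
--         teams = mapping.get(priv)
--         if teams is not None:
--             for team in teams:
--                 privs[team][priv] = True
--     return privs
-- ===== Notes on version B (the rewrite author's own statement) =====
-- stated objective: alternative
-- what changed: A's triple loop (every mapping key x every of the 5 priv names x every team, with a membership test on mapping[priv] per team) is replaced by two independent passes: one pass over the values creating each team's default flag row, then one direct pass over each priv name's own list setting that flag.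
import Mathlib
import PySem

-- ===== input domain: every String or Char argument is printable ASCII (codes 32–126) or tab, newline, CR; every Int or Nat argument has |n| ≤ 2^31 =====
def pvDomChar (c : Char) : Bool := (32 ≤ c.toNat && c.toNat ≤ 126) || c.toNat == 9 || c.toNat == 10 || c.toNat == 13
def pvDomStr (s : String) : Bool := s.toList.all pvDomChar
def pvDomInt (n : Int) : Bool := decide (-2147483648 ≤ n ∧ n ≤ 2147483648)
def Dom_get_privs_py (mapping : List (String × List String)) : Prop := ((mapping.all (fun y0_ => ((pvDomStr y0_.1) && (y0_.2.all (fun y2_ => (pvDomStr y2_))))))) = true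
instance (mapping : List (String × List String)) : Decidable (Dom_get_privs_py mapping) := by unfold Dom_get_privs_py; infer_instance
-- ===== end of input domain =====

-- B replaces A's triple loop (every key × every priv name × every team, with a
-- membership test on mapping[priv] for each team) by two independent passes: one pass
-- creating the default flag rows team by team, then one direct pass over each priv
-- name's own list setting that flag (objective: alternative decomposition).

-- shared literal constants of A's code (the priv-name list and the default flag row)
def pvPrivList : List String := ["maintain", "pull", "push", "admin", "triage"]

def pvDefaultFlags : PySem.Dict String Bool :=
  PySem.Dict.ofList
    [("admin", false), ("pull", false), ("push", false), ("maintain", false), ("triage", false)]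

-- ===== PORT A =====
-- A's inner loop body: 'if team not in privs: privs[team] = dict(...)' then
-- 'if priv in mapping and isinstance(mapping[priv], list) and team in mapping[priv]:
--    privs[team][priv] = True'.  At type dict[str, list[str]] both isinstance checks
-- are always true; 'priv in mapping and team in mapping[priv]' is the contains test
-- on (m.get? priv).getD [].
def pvAStep (m : PySem.Dict String (List String)) (priv : String)
    (privs : PySem.Dict String (PySem.Dict String Bool)) (team : String) :
    PySem.Dict String (PySem.Dict String Bool) :=
  let privs := if privs.contains team then privs else privs.insert team pvDefaultFlags
  if ((m.get? priv).getD []).contains team then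
    privs.modify team PySem.Dict.empty (fun d => d.insert priv true)
  else privs

def get_privs_py (mapping : List (String × List String)) : List (String × List (String × Bool)) :=
  let m := PySem.Dict.ofList mapping
  let privs := m.items.foldl (fun privs kv =>
      pvPrivList.foldl (fun privs priv => kv.2.foldl (pvAStep m priv) privs) privs)
    PySem.Dict.empty
  privs.items.map (fun p => (p.1, p.2.items))

-- ===== PORT B =====
def get_privs_py_alt (mapping : List (String × List String)) : List (String × List (String × Bool)) :=
  let m := PySem.Dict.ofList mapping
  let privs := m.values.foldl (fun privs v =>
      v.foldl (fun privs team => privs.setdefault team pvDefaultFlags) privs)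
    PySem.Dict.empty
  let privs := pvPrivList.foldl (fun privs priv =>
      match m.get? priv with
      | some teams =>
          teams.foldl (fun privs team =>
            privs.modify team PySem.Dict.empty (fun d => d.insert priv true)) privs
      | none => privs) privs
  privs.items.map (fun p => (p.1, p.2.items))

-- ===== PRECONDITION & SPEC =====
def Spec_get_privs_py (mapping : List (String × List String)) (out : List (String × List (String × Bool))) : Prop := out = get_privs_py_alt mapping
instance (mapping : List (String × List String)) (out : List (String × List (String × Bool))) : Decidable (Spec_get_privs_py mapping out) := by unfold Spec_get_privs_py; infer_instance

-- ===== CLAIM (what is proved, stated in full; the proofs are below) =====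
def Claim_equal_get_privs_py : Prop := ∀ (mapping : List (String × List String)), Dom_get_privs_py mapping → Spec_get_privs_py mapping (get_privs_py mapping)

-- ===== LEMMAS AND PROOFS =====

-- the flag condition of A: 'priv in mapping and team in mapping[priv]'
def pvCond (m : PySem.Dict String (List String)) (p t : String) : Bool :=
  ((m.get? p).getD []).contains t

-- one conditional flag update
def pvApply (c : Bool) (p : String) (x : PySem.Dict String Bool) : PySem.Dict String Bool :=
  if c then x.insert p true else x

-- the final flag row of a team
def pvFlags (m : PySem.Dict String (List String)) (t : String) : PySem.Dict String Bool :=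
  pvPrivList.foldl (fun x p => pvApply (pvCond m p t) p x) pvDefaultFlags

-- all team occurrences, in order, over the values of an item list l
def pvFlat (l : List (String × List String)) : List String := (l.map (fun kv => kv.2)).flatten

lemma pvApply_idem (c : Bool) (p : String) (x : PySem.Dict String Bool) :
    pvApply c p (pvApply c p x) = pvApply c p x := by
  cases c <;> simp [pvApply, PySem.Dict.insert_insert_self]

lemma pvFlags_idem (m : PySem.Dict String (List String)) (t : String) :
    pvPrivList.foldl (fun x p => pvApply (pvCond m p t) p x) (pvFlags m t) = pvFlags m t := by
  unfold pvFlags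
  simp only [pvPrivList, List.foldl, pvApply]
  cases pvCond m "maintain" t <;> cases pvCond m "pull" t <;> cases pvCond m "push" t <;>
    cases pvCond m "admin" t <;> cases pvCond m "triage" t <;> simp <;> decide

lemma get_after_setd (privs : PySem.Dict String (PySem.Dict String Bool)) (x : String) :
    (if privs.contains x then privs else privs.insert x pvDefaultFlags).get? x =
      some ((privs.get? x).getD pvDefaultFlags) := by
  rw [PySem.Dict.contains_eq_isSome_get?]
  rcases h : privs.get? x with _ | y <;> simp [h, PySem.Dict.get?_insert]

lemma step_get_self (m : PySem.Dict String (List String)) (p : String)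
    (privs : PySem.Dict String (PySem.Dict String Bool)) (x : String) :
    (pvAStep m p privs x).get? x =
      some (pvApply (pvCond m p x) p ((privs.get? x).getD pvDefaultFlags)) := by
  unfold pvAStep pvApply pvCond
  rcases hc : ((m.get? p).getD []).contains x with _ | _
  · simp only [hc, Bool.false_eq_true, if_false, get_after_setd]
  · simp only [hc, if_true, PySem.Dict.modify, PySem.Dict.getD_eq_get?_getD, get_after_setd,
      Option.getD_some, PySem.Dict.get?_insert, if_pos]

lemma step_get_ne (m : PySem.Dict String (List String)) (p : String)
    (privs : PySem.Dict String (PySem.Dict String Bool)) (x t : String) (h : t ≠ x) :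
    (pvAStep m p privs x).get? t = privs.get? t := by
  unfold pvAStep
  simp only [PySem.Dict.modify, PySem.Dict.getD_eq_get?_getD]
  split <;> split <;> simp [PySem.Dict.get?_insert, h]

lemma pvA_pass_get (m : PySem.Dict String (List String)) (p : String) :
    ∀ (v : List String) (privs : PySem.Dict String (PySem.Dict String Bool)) (t : String),
      (v.foldl (pvAStep m p) privs).get? t =
        if t ∈ v then some (pvApply (pvCond m p t) p ((privs.get? t).getD pvDefaultFlags))
        else privs.get? t := by
  intro v
  induction v with
  | nil => simp
  | cons x v ih =>
    intro privs t
    rw [List.foldl_cons, ih]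
    by_cases hx : t = x
    · subst hx
      simp [step_get_self, pvApply_idem]
    · simp [step_get_ne m p privs x t hx, hx, List.mem_cons]

lemma pvA_body_get (m : PySem.Dict String (List String)) (v : List String) :
    ∀ (ps : List String) (privs : PySem.Dict String (PySem.Dict String Bool)) (t : String),
      (ps.foldl (fun privs priv => v.foldl (pvAStep m priv) privs) privs).get? t =
        if t ∈ v ∧ ps ≠ [] then
          some (ps.foldl (fun x p => pvApply (pvCond m p t) p x) ((privs.get? t).getD pvDefaultFlags))
        else privs.get? t := by
  intro ps
  induction ps with
  | nil => simp
  | cons p ps ih =>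
    intro privs t
    rw [List.foldl_cons, ih]
    by_cases hv : t ∈ v
    · cases ps with
      | nil => simp [hv, pvA_pass_get]
      | cons q qs => simp [hv, pvA_pass_get]
    · simp [hv, pvA_pass_get]

lemma pvA_fold_get (m : PySem.Dict String (List String)) :
    ∀ (l : List (String × List String)) (privs : PySem.Dict String (PySem.Dict String Bool)) (t : String),
      (privs.get? t = none ∨ privs.get? t = some (pvFlags m t)) →
      (l.foldl (fun privs kv =>
          pvPrivList.foldl (fun privs priv => kv.2.foldl (pvAStep m priv) privs) privs) privs).get? t =
        if t ∈ pvFlat l then some (pvFlags m t) else privs.get? t := by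
  intro l
  induction l with
  | nil => intro privs t _; simp [pvFlat]
  | cons kv l ih =>
    intro privs t hp
    have hstep : (pvPrivList.foldl (fun privs priv => kv.2.foldl (pvAStep m priv) privs) privs).get? t =
        if t ∈ kv.2 then some (pvFlags m t) else privs.get? t := by
      rw [pvA_body_get]
      by_cases hv : t ∈ kv.2
      · have hne : pvPrivList ≠ [] := by simp [pvPrivList]
        rw [if_pos ⟨hv, hne⟩, if_pos hv]
        rcases hp with h | h
        · rw [h]; rfl
        · rw [h, Option.getD_some, pvFlags_idem]
      · simp [hv]
    rw [List.foldl_cons, ih _ _ (by rw [hstep]; by_cases hv : t ∈ kv.2 <;> simp [hv, hp]), hstep]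
    by_cases hv : t ∈ kv.2 <;> by_cases hl : t ∈ pvFlat l <;>
      · first
        | (rw [if_pos hl, if_pos (show t ∈ pvFlat (kv :: l) by simp [pvFlat] at hl ⊢; tauto)])
        | (rw [if_neg hl, if_pos hv, if_pos (show t ∈ pvFlat (kv :: l) by simp [pvFlat]; tauto)])
        | (rw [if_neg hl, if_neg hv, if_neg (show t ∉ pvFlat (kv :: l) by simp [pvFlat] at hl ⊢; tauto)])

lemma pvAStep_keys (m : PySem.Dict String (List String)) (p : String)
    (privs : PySem.Dict String (PySem.Dict String Bool)) (x : String) :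
    (pvAStep m p privs x).keys = PySem.Set.add privs.keys x := by
  unfold pvAStep
  rw [PySem.Set.add_eq_ite]
  by_cases hc : privs.contains x = true
  · have hx : x ∈ privs.keys := (PySem.Dict.contains_iff_mem_keys privs x).1 hc
    simp only [hc, if_true, if_pos hx]
    split
    · rw [PySem.Dict.keys_modify, PySem.Dict.keys_insert_of_contains _ _ hc]
    · rfl
  · have hx : x ∉ privs.keys := fun h => hc ((PySem.Dict.contains_iff_mem_keys privs x).2 h)
    simp only [hc, if_neg hx, Bool.false_eq_true, if_false]
    split
    · rw [PySem.Dict.keys_modify,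
        PySem.Dict.keys_insert_of_contains _ _ (PySem.Dict.contains_insert_self _ _ _),
        PySem.Dict.keys_insert_of_not_contains _ _ (by simpa using hc)]
    · rw [PySem.Dict.keys_insert_of_not_contains _ _ (by simpa using hc)]

lemma pvA_pass_keys (m : PySem.Dict String (List String)) (p : String) :
    ∀ (v : List String) (privs : PySem.Dict String (PySem.Dict String Bool)),
      (v.foldl (pvAStep m p) privs).keys = PySem.Set.update privs.keys v := by
  intro v
  induction v with
  | nil => intro privs; rfl
  | cons x v ih =>
    intro privs
    rw [List.foldl_cons, ih, PySem.Set.update_cons, pvAStep_keys]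

lemma upd_of_sub (v : List String) : ∀ (K : List String), (∀ x ∈ v, x ∈ K) →
    PySem.Set.update K v = K := by
  induction v with
  | nil => intro K _; rfl
  | cons x v ih =>
    intro K h
    rw [PySem.Set.update_cons, PySem.Set.add_of_mem (h x (by simp))]
    exact ih K (fun y hy => h y (by simp [hy]))

lemma pvSet_update_idem (K v : List String) :
    PySem.Set.update (PySem.Set.update K v) v = PySem.Set.update K v := by
  exact upd_of_sub v _ (fun x hx => by simp [PySem.Set.mem_update, hx])

lemma pvA_body_keys (m : PySem.Dict String (List String)) (v : List String) :
    ∀ (ps : List String) (privs : PySem.Dict String (PySem.Dict String Bool)),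
      (ps.foldl (fun privs priv => v.foldl (pvAStep m priv) privs) privs).keys =
        if ps = [] then privs.keys else PySem.Set.update privs.keys v := by
  intro ps
  induction ps with
  | nil => intro privs; simp
  | cons p ps ih =>
    intro privs
    rw [List.foldl_cons, ih]
    cases ps with
    | nil => simp [pvA_pass_keys]
    | cons q qs => simp [pvA_pass_keys, pvSet_update_idem]

lemma pvA_fold_keys (m : PySem.Dict String (List String)) :
    ∀ (l : List (String × List String)) (privs : PySem.Dict String (PySem.Dict String Bool)),
      (l.foldl (fun privs kv =>
          pvPrivList.foldl (fun privs priv => kv.2.foldl (pvAStep m priv) privs) privs) privs).keys =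
        l.foldl (fun K kv => PySem.Set.update K kv.2) privs.keys := by
  intro l
  induction l with
  | nil => intro privs; rfl
  | cons kv l ih =>
    intro privs
    rw [List.foldl_cons, List.foldl_cons, ih, pvA_body_keys]
    simp [pvPrivList]

lemma pvB_set_get (v : List String) :
    ∀ (privs : PySem.Dict String (PySem.Dict String Bool)) (t : String),
      (v.foldl (fun privs team => privs.setdefault team pvDefaultFlags) privs).get? t =
        if t ∈ v then some ((privs.get? t).getD pvDefaultFlags) else privs.get? t := by
  induction v with
  | nil => simp
  | cons x v ih =>
    intro privs t
    rw [List.foldl_cons, ih]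
    by_cases hx : t = x
    · subst hx
      simp [PySem.Dict.get?_setdefault_self]
    · simp [PySem.Dict.get?_setdefault_of_ne privs pvDefaultFlags hx, hx, List.mem_cons]

lemma pvB_set_fold_get (vs : List (List String)) :
    ∀ (privs : PySem.Dict String (PySem.Dict String Bool)) (t : String),
      (vs.foldl (fun privs v =>
          v.foldl (fun privs team => privs.setdefault team pvDefaultFlags) privs) privs).get? t =
        if t ∈ vs.flatten then some ((privs.get? t).getD pvDefaultFlags) else privs.get? t := by
  induction vs with
  | nil => simp
  | cons v vs ih =>
    intro privs t
    rw [List.foldl_cons, ih, pvB_set_get]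
    by_cases hv : t ∈ v <;> by_cases hl : t ∈ vs.flatten <;> simp [hv, hl]

lemma pvB_mark_get (p : String) (teams : List String) :
    ∀ (privs : PySem.Dict String (PySem.Dict String Bool)) (t : String),
      (teams.foldl (fun privs team =>
          privs.modify team PySem.Dict.empty (fun d => d.insert p true)) privs).get? t =
        if t ∈ teams then some (((privs.get? t).getD PySem.Dict.empty).insert p true)
        else privs.get? t := by
  induction teams with
  | nil => simp
  | cons x teams ih =>
    intro privs t
    rw [List.foldl_cons, ih]
    simp only [PySem.Dict.modify, PySem.Dict.getD_eq_get?_getD]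
    by_cases hx : t = x
    · subst hx
      by_cases ht : t ∈ teams <;>
        simp [ht, PySem.Dict.get?_insert, PySem.Dict.insert_insert_self]
    · simp [PySem.Dict.get?_insert, hx, List.mem_cons]

lemma pvB_set_keys (v : List String) :
    ∀ (privs : PySem.Dict String (PySem.Dict String Bool)),
      (v.foldl (fun privs team => privs.setdefault team pvDefaultFlags) privs).keys =
        PySem.Set.update privs.keys v := by
  induction v with
  | nil => intro privs; rfl
  | cons x v ih =>
    intro privs
    rw [List.foldl_cons, ih, PySem.Set.update_cons, PySem.Dict.keys_setdefault,
      PySem.Set.add_eq_ite]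
    by_cases hx : x ∈ privs.keys
    · rw [if_pos ((PySem.Dict.contains_iff_mem_keys privs x).2 hx), if_pos hx]
    · rw [if_neg (fun hh => hx ((PySem.Dict.contains_iff_mem_keys privs x).1 hh)), if_neg hx]

lemma pvB_mark_keys (p : String) (teams : List String) :
    ∀ (privs : PySem.Dict String (PySem.Dict String Bool)),
      (∀ s ∈ teams, s ∈ privs.keys) →
      (teams.foldl (fun privs team =>
          privs.modify team PySem.Dict.empty (fun d => d.insert p true)) privs).keys = privs.keys := by
  induction teams with
  | nil => intro privs _; rfl
  | cons x teams ih =>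
    intro privs h
    have hk : (privs.modify x PySem.Dict.empty (fun d => d.insert p true)).keys = privs.keys := by
      rw [PySem.Dict.keys_modify,
        PySem.Dict.keys_insert_of_contains _ _
          ((PySem.Dict.contains_iff_mem_keys privs x).2 (h x (by simp)))]
    rw [List.foldl_cons, ih _ (by rw [hk]; exact fun s hs => h s (by simp [hs])), hk]

lemma pvB_phase_get (m : PySem.Dict String (List String)) :
    ∀ (ps : List String) (privs : PySem.Dict String (PySem.Dict String Bool)),
      (∀ p s, pvCond m p s = true → (privs.get? s).isSome) →
      ∀ t, (ps.foldl (fun privs priv =>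
          match m.get? priv with
          | some teams =>
              teams.foldl (fun privs team =>
                privs.modify team PySem.Dict.empty (fun d => d.insert priv true)) privs
          | none => privs) privs).get? t =
        Option.map (fun x => ps.foldl (fun x p => pvApply (pvCond m p t) p x) x) (privs.get? t) := by
  intro ps
  induction ps with
  | nil => intro privs _ t; cases h : privs.get? t <;> simp [h]
  | cons p ps ih =>
    intro privs hyp t
    simp only [List.foldl_cons]
    rcases hm : m.get? p with _ | teams
    · have hc : pvCond m p t = false := by simp [pvCond, hm]
      simp only [hm]
      rw [ih privs hyp t, hc]
      simp [pvApply]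
    · simp only [hm]
      have hyp1 : ∀ p' s, pvCond m p' s = true →
          ((teams.foldl (fun privs team =>
            privs.modify team PySem.Dict.empty (fun d => d.insert p true)) privs).get? s).isSome := by
        intro p' s hc
        rw [pvB_mark_get]
        split <;> simp [Option.isSome] at *
        · exact hyp p' s hc
      rw [ih _ hyp1 t, pvB_mark_get]
      by_cases ht : t ∈ teams
      · have hc : pvCond m p t = true := by simp [pvCond, hm, ht]
        rcases hsome : privs.get? t with _ | x
        · exact absurd (hyp p t hc) (by simp [hsome])
        · simp [hsome, ht, hc, pvApply]
      · have hc : pvCond m p t = false := by simp [pvCond, hm]; exact ht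
        simp only [if_neg ht, hc]
        cases privs.get? t <;> simp [pvApply]

lemma pvB_phase_keys (m : PySem.Dict String (List String)) :
    ∀ (ps : List String) (privs : PySem.Dict String (PySem.Dict String Bool)),
      (∀ p s, pvCond m p s = true → s ∈ privs.keys) →
      (ps.foldl (fun privs priv =>
          match m.get? priv with
          | some teams =>
              teams.foldl (fun privs team =>
                privs.modify team PySem.Dict.empty (fun d => d.insert priv true)) privs
          | none => privs) privs).keys = privs.keys := by
  intro ps
  induction ps with
  | nil => intro privs _; rfl
  | cons p ps ih =>
    intro privs hyp
    rw [List.foldl_cons]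
    rcases hm : m.get? p with _ | teams
    · simp only [hm]; exact ih privs hyp
    · simp only [hm]
      have hk : (teams.foldl (fun privs team =>
          privs.modify team PySem.Dict.empty (fun d => d.insert p true)) privs).keys = privs.keys :=
        pvB_mark_keys p teams privs (fun s hs => hyp p s (by simp [pvCond, hm, hs]))
      rw [ih _ (by rw [hk]; exact hyp), hk]

lemma pvB_set_fold_keys (vs : List (List String)) :
    ∀ (privs : PySem.Dict String (PySem.Dict String Bool)),
      (vs.foldl (fun privs v =>
          v.foldl (fun privs team => privs.setdefault team pvDefaultFlags) privs) privs).keys =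
        vs.foldl (fun K v => PySem.Set.update K v) privs.keys := by
  induction vs with
  | nil => intro privs; rfl
  | cons v vs ih => intro privs; rw [List.foldl_cons, List.foldl_cons, ih, pvB_set_keys]

lemma pvKeys_nodup (l : List (String × List String)) :
    ∀ (K : List String), K.Nodup → (l.foldl (fun K kv => PySem.Set.update K kv.2) K).Nodup := by
  induction l with
  | nil => intro K h; exact h
  | cons kv l ih => intro K h; exact ih _ (PySem.Set.nodup_update K kv.2 h)

lemma pvCond_mem_flat (m : PySem.Dict String (List String)) (p s : String)
    (h : pvCond m p s = true) : s ∈ pvFlat m.items := by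
  unfold pvCond at h
  rcases hm : m.get? p with _ | teams
  · rw [hm] at h; simp at h
  · rw [hm] at h
    simp only [Option.getD_some, List.contains_iff_mem] at h
    have : (p, teams) ∈ m.items := PySem.Dict.mem_items_of_get?_eq_some m hm
    exact List.mem_flatten.2 ⟨teams, List.mem_map.2 ⟨(p, teams), this, rfl⟩, h⟩


-- ===== VERDICT (by name: the statement is the Claim_ definition above) =====
theorem get_privs_py_spec : Claim_equal_get_privs_py := by
  intro mapping _
  unfold Spec_get_privs_py get_privs_py get_privs_py_alt
  dsimp only
  set m := PySem.Dict.ofList mapping with hm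
  set DA := m.items.foldl (fun privs kv =>
      pvPrivList.foldl (fun privs priv => kv.2.foldl (pvAStep m priv) privs) privs)
    PySem.Dict.empty with hDA
  set D1 := m.values.foldl (fun privs v =>
      v.foldl (fun privs team => privs.setdefault team pvDefaultFlags) privs)
    PySem.Dict.empty with hD1
  set DB := pvPrivList.foldl (fun privs priv =>
      match m.get? priv with
      | some teams =>
          teams.foldl (fun privs team =>
            privs.modify team PySem.Dict.empty (fun d => d.insert priv true)) privs
      | none => privs) D1 with hDB
  have hvals : m.values = m.items.map (fun kv => kv.2) := rfl
  have hflat : m.values.flatten = pvFlat m.items := by rw [hvals]; rfl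
  -- get? characterisations
  have hAget : ∀ t, DA.get? t = if t ∈ pvFlat m.items then some (pvFlags m t) else none := by
    intro t
    rw [hDA, pvA_fold_get m m.items PySem.Dict.empty t (Or.inl (PySem.Dict.get?_empty t)),
      PySem.Dict.get?_empty]
  have hD1get : ∀ t, D1.get? t = if t ∈ pvFlat m.items then some pvDefaultFlags else none := by
    intro t
    rw [hD1, pvB_set_fold_get, PySem.Dict.get?_empty, hflat]
    split <;> rfl
  have hD1some : ∀ p s, pvCond m p s = true → (D1.get? s).isSome := by
    intro p s hc
    rw [hD1get s, if_pos (pvCond_mem_flat m p s hc)]; rfl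
  have hBget : ∀ t, DB.get? t = if t ∈ pvFlat m.items then some (pvFlags m t) else none := by
    intro t
    rw [hDB, pvB_phase_get m pvPrivList D1 hD1some t, hD1get t]
    split <;> rfl
  -- keys
  have hAkeys : DA.keys = m.items.foldl (fun K kv => PySem.Set.update K kv.2) [] := by
    rw [hDA, pvA_fold_keys]; rfl
  have hBkeys : DB.keys = m.items.foldl (fun K kv => PySem.Set.update K kv.2) [] := by
    have h1 : D1.keys = m.items.foldl (fun K kv => PySem.Set.update K kv.2) [] := by
      rw [hD1, pvB_set_fold_keys, hvals, List.foldl_map]; rfl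
    rw [hDB, pvB_phase_keys m pvPrivList D1, h1]
    intro p s hc
    rw [← PySem.Dict.contains_iff_mem_keys, PySem.Dict.contains_eq_isSome_get?]
    exact hD1some p s hc
  have hnodup : (m.items.foldl (fun K kv => PySem.Set.update K kv.2) []).Nodup :=
    pvKeys_nodup m.items [] List.nodup_nil
  -- items equal
  have hitems : DA.items = DB.items := by
    rw [PySem.Dict.items_eq_map_keys DA (by rw [hAkeys]; exact hnodup) PySem.Dict.empty,
      PySem.Dict.items_eq_map_keys DB (by rw [hBkeys]; exact hnodup) PySem.Dict.empty,
      hAkeys, hBkeys]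
    apply List.map_congr_left
    intro k hk
    have hkf : k ∈ pvFlat m.items := by
      by_contra hnf
      have : DA.contains k = true := by
        rw [PySem.Dict.contains_iff_mem_keys, hAkeys]; exact hk
      rw [PySem.Dict.contains_eq_isSome_get?, hAget k, if_neg hnf] at this
      simp at this
    rw [PySem.Dict.getD_eq_get?_getD, PySem.Dict.getD_eq_get?_getD, hAget, hBget, if_pos hkf]
  rw [hitems]
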